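-- pv_equiv track=rewrite | github.com/chandeler/SKYPER | SKYPER-CODES-run-main_together_copy.py/load_data.py | load_data_group_by_arity
-- ===== SOURCE A (Python) =====
-- def load_data_group_by_arity(data):
--     facts_group_by_arity = dict()
--
--     for facts in data:
--         if str(len(facts)) not in list(facts_group_by_arity.keys()):
--             facts_group_by_arity[str(len(facts))] = []
--             facts_group_by_arity[str(len(facts))].append(facts)
--         else:
--             facts_group_by_arity[str(len(facts))].append(facts)
--     data_group_by_arity_list = list(facts_group_by_arity.values())
--     return data_group_by_arity_list
-- ===== SOURCE B (Python) =====
-- def load_data_group_by_arity(data):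
--     keys = []
--     for facts in data:
--         k = str(len(facts))
--         if k not in keys:
--             keys.append(k)
--     return [[facts for facts in data if str(len(facts)) == k] for k in keys]
-- ===== Notes on version B (the rewrite author's own statement) =====
-- stated objective: alternative
-- what changed: Replaces the dict-accumulation loop (one dict entry appended per element) with a two-phase scheme: one pass collecting the distinct arity keys in first-seen order, then one filtering pass over the data per distinct key.
import Mathlib
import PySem

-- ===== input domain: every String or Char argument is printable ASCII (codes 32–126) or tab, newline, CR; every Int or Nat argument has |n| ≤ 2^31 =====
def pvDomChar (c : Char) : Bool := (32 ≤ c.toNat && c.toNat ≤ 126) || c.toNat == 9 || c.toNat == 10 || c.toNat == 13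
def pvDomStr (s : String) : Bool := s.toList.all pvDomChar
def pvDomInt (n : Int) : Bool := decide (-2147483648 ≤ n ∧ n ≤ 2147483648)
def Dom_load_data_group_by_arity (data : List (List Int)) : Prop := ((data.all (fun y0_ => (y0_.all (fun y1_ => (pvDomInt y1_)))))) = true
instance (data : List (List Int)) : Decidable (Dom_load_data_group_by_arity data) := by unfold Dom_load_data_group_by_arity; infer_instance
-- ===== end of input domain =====

-- B replaces A's dict-accumulation loop by a collect-distinct-keys pass followed by one filtering pass over the data per distinct key (alternative decomposition, same cost).


-- ===== PORT A =====
def load_data_group_by_arity (data : List (List Int)) : List (List (List Int)) :=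
  let d := data.foldl (fun (d : PySem.Dict String (List (List Int))) facts =>
      let k := PySem.Int.toStr (facts.length : Int)
      if (d.keys.contains k) = false then
        ((d.insert k []).modify k [] (fun v => v ++ [facts]))
      else
        d.modify k [] (fun v => v ++ [facts]))
    PySem.Dict.empty
  d.values

-- ===== PORT B =====
def load_data_group_by_arity_alt (data : List (List Int)) : List (List (List Int)) :=
  let keys := data.foldl (fun (ks : List String) facts =>
      let k := PySem.Int.toStr (facts.length : Int)
      if ks.contains k then ks else ks ++ [k]) []
  keys.map (fun k => data.filter (fun facts => PySem.Int.toStr (facts.length : Int) == k))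

-- ===== PRECONDITION & SPEC =====
def Spec_load_data_group_by_arity (data : List (List Int)) (out : List (List (List Int))) : Prop := out = load_data_group_by_arity_alt data
instance (data : List (List Int)) (out : List (List (List Int))) : Decidable (Spec_load_data_group_by_arity data out) := by unfold Spec_load_data_group_by_arity; infer_instance

-- ===== CLAIM (what is proved, stated in full; the proofs are below) =====
def Claim_equal_load_data_group_by_arity : Prop := ∀ (data : List (List Int)), Dom_load_data_group_by_arity data → Spec_load_data_group_by_arity data (load_data_group_by_arity data)

-- ===== LEMMAS AND PROOFS =====

-- the grouping key str(len(facts)) both programs use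
def pvKey (facts : List Int) : String := PySem.Int.toStr (facts.length : Int)

-- A's loop body (insert-then-append / append) is a single dict `modify` in both branches
theorem pv_step_eq (d : PySem.Dict String (List (List Int))) (facts : List Int) :
    (if (d.keys.contains (pvKey facts)) = false then
        ((d.insert (pvKey facts) []).modify (pvKey facts) [] (fun v => v ++ [facts]))
      else d.modify (pvKey facts) [] (fun v => v ++ [facts]))
    = d.modify (pvKey facts) [] (fun v => v ++ [facts]) := by
  split_ifs with h
  · have hc : d.contains (pvKey facts) = false := by
      rw [PySem.Dict.contains_eq_decide_mem_keys]
      simpa using h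
    simp [PySem.Dict.modify, PySem.Dict.getD_insert_self,
      PySem.Dict.insert_insert_self, PySem.Dict.getD_of_not_contains _ _ hc]
  · rfl

-- the common normal form both ports reach: first-seen distinct keys, each mapped to its filtered group
theorem pv_A_eq (data : List (List Int)) :
    load_data_group_by_arity data
      = (PySem.Set.ofList (data.map pvKey)).map
          (fun k => data.filter (fun facts => pvKey facts == k)) := by
  have hfun : (fun (d : PySem.Dict String (List (List Int))) (facts : List Int) =>
      let k := PySem.Int.toStr (facts.length : Int)
      if (d.keys.contains k) = false then
        ((d.insert k []).modify k [] (fun v => v ++ [facts]))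
      else d.modify k [] (fun v => v ++ [facts]))
    = (fun d facts => d.modify (pvKey facts) [] (fun v => v ++ [facts])) := by
    funext d facts
    exact pv_step_eq d facts
  have hA : load_data_group_by_arity data
      = (data.foldl (fun d facts => d.modify (pvKey facts) [] (fun v => v ++ [facts]))
          PySem.Dict.empty).values := by
    simp only [load_data_group_by_arity]
    rw [hfun]
  have hnd : (data.foldl (fun d facts => d.modify (pvKey facts) [] (fun v => v ++ [facts]))
      PySem.Dict.empty).keys.Nodup :=
    PySem.Dict.nodup_keys_foldl_modify_key data pvKey []
      (fun _ facts => (fun v => v ++ [facts])) PySem.Dict.empty PySem.Dict.nodup_keys_empty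
  have hkeys : (data.foldl (fun d facts => d.modify (pvKey facts) [] (fun v => v ++ [facts]))
      PySem.Dict.empty).keys = PySem.Set.ofList (data.map pvKey) := by
    rw [PySem.Dict.keys_foldl_modify_key data pvKey []
      (fun _ facts => (fun v => v ++ [facts]))]
    rw [PySem.Set.ofList_eq_foldl]
    rfl
  have hgetD : ∀ k, (data.foldl (fun d facts => d.modify (pvKey facts) [] (fun v => v ++ [facts]))
      PySem.Dict.empty).getD k [] = data.filter (fun facts => pvKey facts == k) := by
    intro k
    have hmap : data.foldl (fun d facts => d.modify (pvKey facts) [] (fun v => v ++ [facts]))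
        PySem.Dict.empty
        = (data.map (fun f => (pvKey f, f))).foldl
            (fun d p => d.modify p.1 [] (fun v => v ++ [p.2])) PySem.Dict.empty := by
      rw [List.foldl_map]
    rw [hmap, PySem.Dict.getD_foldl_modify_append, PySem.Dict.getD_empty]
    simp [List.filter_map, Function.comp_def]
  rw [hA, PySem.Dict.values_eq_map_keys _ hnd [], hkeys]
  exact List.map_congr_left (fun k _ => hgetD k)

theorem pv_B_eq (data : List (List Int)) :
    load_data_group_by_arity_alt data
      = (PySem.Set.ofList (data.map pvKey)).map
          (fun k => data.filter (fun facts => pvKey facts == k)) := by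
  simp only [load_data_group_by_arity_alt]
  rw [PySem.Set.ofList_eq_foldl, List.foldl_map]
  rfl

-- ===== VERDICT (by name: the statement is the Claim_ definition above) =====
theorem load_data_group_by_arity_spec : Claim_equal_load_data_group_by_arity := by
  intro data _
  unfold Spec_load_data_group_by_arity
  rw [pv_A_eq, pv_B_eq]
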